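-- pv_equiv track=rewrite | github.com/aditya616727/coding_ninja_solution | Terms Of AP/solution.py | termsOfAP
-- ===== SOURCE A (Python) =====
-- def termsOfAP(x):
--     fin_arr = []
--     temp = 0
--     i =1
--     while len(fin_arr) !=x:
--         if i%4 !=2:
--             fin_arr.append(3*i+2)
--         i +=1
--
--     return fin_arr
--
--     # Write your code here
--     # Return a list of integers
--     pass
-- ===== SOURCE B (Python) =====
-- def termsOfAP(x):
--     # Closed-form: output position k maps directly to the surviving index
--     # i = 4*(k//3) + (1,3,4)[k%3]; no skip test, no wasted iterations.
--     return [3 * (4 * (k // 3) + (1, 3, 4)[k % 3]) + 2 for k in range(x)]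
-- ===== Notes on version B (the rewrite author's own statement) =====
-- stated objective: simpler
-- what changed: Replaced the append-until-length-matches while loop with a skip branch by a single comprehension that computes each term directly from its output index k via the surviving index 4*(k//3) plus a per-block offset table.
import Mathlib
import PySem

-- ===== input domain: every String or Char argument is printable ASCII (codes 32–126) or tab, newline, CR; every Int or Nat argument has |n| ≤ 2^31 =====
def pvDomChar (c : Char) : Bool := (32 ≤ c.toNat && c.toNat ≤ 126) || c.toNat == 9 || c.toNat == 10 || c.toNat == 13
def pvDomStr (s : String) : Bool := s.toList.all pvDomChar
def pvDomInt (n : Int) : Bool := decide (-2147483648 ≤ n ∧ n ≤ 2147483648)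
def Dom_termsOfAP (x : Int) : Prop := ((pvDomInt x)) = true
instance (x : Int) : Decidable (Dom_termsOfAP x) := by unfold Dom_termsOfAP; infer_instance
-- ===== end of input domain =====

-- B replaces A's append-until-length-matches loop (with its i%4==2 skip branch) by a
-- closed-form map from each output index k to the surviving index 4*(k//3)+(1,3,4)[k%3]: simpler.

-- ===== PORT A =====
-- A's while loop runs until len(fin_arr) == x; fuel = number of appends still needed.
-- For x < 0 Python diverges; the port's totalization guard returns [] there (outside Pre_).
theorem mod4_eq (a : Int) : PySem.Int.mod a 4 = a % 4 :=
  PySem.Int.mod_eq_emod_of_pos (by norm_num)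

def loopA (n : Nat) (i : Int) (acc : List Int) : List Int :=
  match n with
  | 0 => acc
  | Nat.succ n' =>
    if PySem.Int.mod i 4 ≠ 2 then loopA n' (i + 1) (acc ++ [3 * i + 2])
    else loopA (n' + 1) (i + 1) acc
termination_by 2 * n + (if PySem.Int.mod i 4 = 2 then 1 else 0)
decreasing_by
  · simp only [mod4_eq] at *; split <;> omega
  · simp only [mod4_eq] at *; split <;> (try split) <;> omega

def termsOfAP (x : Int) : List Int :=
  if 0 ≤ x then loopA x.toNat 1 [] else []

-- ===== PORT B =====
-- the tuple index (1,3,4)[k%3] is ported as the exhaustive test on k%3 ∈ {0,1,2} (exact)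
def termsOfAP_alt (x : Int) : List Int :=
  (PySem.List.pyRange 0 x 1).map (fun k =>
    3 * (4 * PySem.Int.floordiv k 3 +
      (if PySem.Int.mod k 3 = 0 then 1 else if PySem.Int.mod k 3 = 1 then 3 else 4)) + 2)

-- ===== PRECONDITION & SPEC =====
-- Pre_ excludes x < 0, on which Python A never terminates (while len != x loops forever).
def Pre_termsOfAP (x : Int) : Prop := 0 ≤ x
instance (x : Int) : Decidable (Pre_termsOfAP x) := by unfold Pre_termsOfAP; infer_instance
def pvWitness_termsOfAP : Int := 5

def Spec_termsOfAP (x : Int) (out : List Int) : Prop := out = termsOfAP_alt x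
instance (x : Int) (out : List Int) : Decidable (Spec_termsOfAP x out) := by unfold Spec_termsOfAP; infer_instance

-- ===== CLAIM (what is proved, stated in full; the proofs are below) =====
def Claim_equal_termsOfAP : Prop := ∀ (x : Int), Dom_termsOfAP x → Pre_termsOfAP x → Spec_termsOfAP x (termsOfAP x)

-- ===== LEMMAS AND PROOFS =====

-- the surviving index for output position m
def iOf (m : Nat) : Int :=
  4 * (m / 3) + (if m % 3 = 0 then 1 else if m % 3 = 1 then 3 else 4)

theorem iOf_mod (m : Nat) : PySem.Int.mod (iOf m) 4 ≠ 2 := by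
  rw [mod4_eq]; simp [iOf]; omega

theorem iOf_succ_of_ne (m : Nat) (h : m % 3 ≠ 0) : iOf m + 1 = iOf (m + 1) := by
  simp [iOf]; omega

theorem iOf_succ_of_eq (m : Nat) (h : m % 3 = 0) : iOf m + 2 = iOf (m + 1) := by
  simp [iOf]; omega

theorem iOf_succ_mod (m : Nat) (h : m % 3 = 0) : PySem.Int.mod (iOf m + 1) 4 = 2 := by
  rw [mod4_eq]; simp [iOf, h]; omega

theorem loop_eq : ∀ (n m : Nat) (acc : List Int),
    loopA n (iOf m) acc = acc ++ (List.range n).map (fun j => 3 * iOf (m + j) + 2) := by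
  intro n
  induction n with
  | zero => intro m acc; simp [loopA]
  | succ n' ih =>
    intro m acc
    rw [loopA, if_pos (iOf_mod m)]
    have hr : (List.range (n' + 1)).map (fun j => 3 * iOf (m + j) + 2)
        = (3 * iOf m + 2) :: (List.range n').map (fun j => 3 * iOf (m + 1 + j) + 2) := by
      rw [List.range_succ_eq_map]
      simp [List.map_map, Function.comp]
      intro j _
      congr 1
      omega
    by_cases h0 : m % 3 = 0
    · cases n' with
      | zero => simp [loopA]
      | succ n'' =>
        rw [loopA, if_neg (by rw [iOf_succ_mod m h0]; simp)]
        have : iOf m + 1 + 1 = iOf (m + 1) := by rw [add_assoc]; exact iOf_succ_of_eq m h0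
        rw [this, ih (m + 1), hr]
        simp
    · rw [iOf_succ_of_ne m h0, ih (m + 1), hr]
      simp

theorem alt_term_eq (k : Nat) :
    3 * (4 * PySem.Int.floordiv (0 + (k : Int)) 3 +
      (if PySem.Int.mod (0 + (k : Int)) 3 = 0 then 1
       else if PySem.Int.mod (0 + (k : Int)) 3 = 1 then 3 else 4)) + 2
    = 3 * iOf k + 2 := by
  have h1 : PySem.Int.floordiv (0 + (k : Int)) 3 = ((k / 3 : Nat) : Int) := by
    rw [zero_add]; exact_mod_cast PySem.Int.floordiv_natCast k 3
  have h2 : PySem.Int.mod (0 + (k : Int)) 3 = ((k % 3 : Nat) : Int) := by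
    rw [zero_add]; exact_mod_cast PySem.Int.mod_natCast k 3
  rw [h1, h2]
  simp [iOf]
  omega

-- ===== VERDICT (by name: the statement is the Claim_ definition above) =====
theorem termsOfAP_spec : Claim_equal_termsOfAP := by
  intro x _ hpre
  unfold Pre_termsOfAP at hpre
  unfold Spec_termsOfAP termsOfAP termsOfAP_alt
  rw [if_pos hpre, PySem.List.pyRange_one]
  have h := loop_eq x.toNat 0 []
  rw [show iOf 0 = 1 by simp [iOf]] at h
  rw [h, List.map_map]
  simp only [List.nil_append, sub_zero]
  exact List.map_congr_left (fun k _ => by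
    simp only [Function.comp_apply]
    rw [Nat.zero_add]
    exact (alt_term_eq k).symm)
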